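-- pv_equiv track=rewrite | github.com/thealper2/codewars-solutions | 7-kyu/simple_fun_32_create_anagram.py | create_anagram
-- ===== SOURCE A (Python) =====
-- from collections import Counter
--
-- def create_anagram(s, t):
--     freq_s = Counter(s)
--     freq_t = Counter(t)
--
--     replacements = 0
--     all_chars = set(freq_s.keys()).union(set(freq_t.keys()))
--
--     for char in all_chars:
--         replacements += abs(freq_s[char] - freq_t[char])
--
--     return replacements // 2
-- ===== SOURCE B (Python) =====
-- def create_anagram(s, t):
--     a = sorted(s)
--     b = sorted(t)
--     i = j = common = 0
--     while i < len(a) and j < len(b):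
--         if a[i] == b[j]:
--             common += 1
--             i += 1
--             j += 1
--         elif a[i] < b[j]:
--             i += 1
--         else:
--             j += 1
--     return (len(s) + len(t)) // 2 - common
-- ===== Notes on version B (the rewrite author's own statement) =====
-- stated objective: alternative
-- what changed: B sorts both strings and counts shared characters with a two-pointer merge over the two sorted lists (no Counter, no key-union scan), then returns (len(s)+len(t))//2 - common in closed form; A builds two Counters and halves the sum of absolute per-character count differences over the union of their key sets.
import Mathlib
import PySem

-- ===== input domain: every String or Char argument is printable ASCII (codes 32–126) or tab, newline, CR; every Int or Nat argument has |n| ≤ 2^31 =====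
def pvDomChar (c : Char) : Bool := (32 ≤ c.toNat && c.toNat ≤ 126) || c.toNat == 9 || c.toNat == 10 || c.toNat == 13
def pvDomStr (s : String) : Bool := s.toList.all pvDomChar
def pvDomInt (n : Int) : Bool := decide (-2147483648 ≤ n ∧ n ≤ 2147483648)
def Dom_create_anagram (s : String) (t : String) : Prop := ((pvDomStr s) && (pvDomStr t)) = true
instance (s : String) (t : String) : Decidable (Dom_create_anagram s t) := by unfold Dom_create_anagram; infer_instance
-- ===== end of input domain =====

-- B sorts both strings and counts shared characters with a two-pointer merge, returning
-- (len(s)+len(t))//2 - common; A halves the summed per-character |count difference|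
-- over the union of two Counters' key sets ('alternative' algorithm; sort-based).


-- ===== PORT A =====
def create_anagram (s : String) (t : String) : Int :=
  let freq_s := PySem.Dict.counter s.toList
  let freq_t := PySem.Dict.counter t.toList
  let all_chars := PySem.Set.union (PySem.Set.ofList freq_s.keys) (PySem.Set.ofList freq_t.keys)
  let replacements := all_chars.foldl (fun acc c => acc + |freq_s.getD c 0 - freq_t.getD c 0|) 0
  PySem.Int.floordiv replacements 2

-- ===== PORT B =====
-- the two-pointer while loop of Source B, transcribed as recursion on the two suffixes
def pvMergeCommon : List Char → List Char → Int
  | [], _ => 0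
  | _ :: _, [] => 0
  | x :: xs, y :: ys =>
    if x = y then 1 + pvMergeCommon xs ys
    else if x < y then pvMergeCommon xs (y :: ys)
    else pvMergeCommon (x :: xs) ys
termination_by a b => a.length + b.length
decreasing_by all_goals simp <;> omega

def create_anagram_alt (s : String) (t : String) : Int :=
  let a := PySem.List.sorted s.toList (fun c => c)
  let b := PySem.List.sorted t.toList (fun c => c)
  let common := pvMergeCommon a b
  PySem.Int.floordiv ((PySem.Str.len s : Int) + (PySem.Str.len t : Int)) 2 - common

-- ===== PRECONDITION & SPEC =====
def Spec_create_anagram (s : String) (t : String) (out : Int) : Prop := out = create_anagram_alt s t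
instance (s : String) (t : String) (out : Int) : Decidable (Spec_create_anagram s t out) := by unfold Spec_create_anagram; infer_instance

-- ===== CLAIM (what is proved, stated in full; the proofs are below) =====
def Claim_equal_create_anagram : Prop := ∀ (s : String) (t : String), Dom_create_anagram s t → Spec_create_anagram s t (create_anagram s t)

-- ===== LEMMAS AND PROOFS =====

-- the merge count on two ascending lists is the size of the multiset intersection
theorem pv_mergeCommon_eq_inter (a b : List Char)
    (ha : a.Pairwise (· ≤ ·)) (hb : b.Pairwise (· ≤ ·)) :
    pvMergeCommon a b = (((a : Multiset Char) ∩ (b : Multiset Char)).card : Int) := by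
  induction a, b using pvMergeCommon.induct with
  | case1 b => simp [pvMergeCommon]
  | case2 x xs => simp [pvMergeCommon]
  | case3 xs y ys ih =>
    rw [List.pairwise_cons] at ha hb
    have hmem : y ∈ (y ::ₘ (ys : Multiset Char)) := Multiset.mem_cons_self y _
    rw [show ((y :: xs : List Char) : Multiset Char) = y ::ₘ (xs : Multiset Char) from rfl,
        show ((y :: ys : List Char) : Multiset Char) = y ::ₘ (ys : Multiset Char) from rfl,
        Multiset.cons_inter_of_pos _ hmem, Multiset.erase_cons_head]
    simp [pvMergeCommon, ih ha.2 hb.2]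
    omega
  | case4 x xs y ys hxy hlt ih =>
    rw [List.pairwise_cons] at ha
    have hnot : x ∉ ((y :: ys : List Char) : Multiset Char) := by
      intro h
      rw [show ((y :: ys : List Char) : Multiset Char) = y ::ₘ (ys : Multiset Char) from rfl,
          Multiset.mem_cons] at h
      rcases h with h | h
      · exact hxy h
      · have := (List.pairwise_cons.mp hb).1 x (by exact_mod_cast h)
        exact absurd hlt (not_lt.mpr this)
    rw [show ((x :: xs : List Char) : Multiset Char) = x ::ₘ (xs : Multiset Char) from rfl,
        Multiset.cons_inter_of_neg _ hnot]
    simp [pvMergeCommon, hxy, hlt, ih ha.2 hb]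
  | case5 x xs y ys hxy hlt ih =>
    rw [List.pairwise_cons] at hb
    have hnot : y ∉ ((x :: xs : List Char) : Multiset Char) := by
      intro h
      rw [show ((x :: xs : List Char) : Multiset Char) = x ::ₘ (xs : Multiset Char) from rfl,
          Multiset.mem_cons] at h
      rcases h with h | h
      · exact hxy h.symm
      · have hyx : y < x := lt_of_le_of_ne (not_lt.mp hlt) (fun e => hxy e.symm)
        have := (List.pairwise_cons.mp ha).1 y (by exact_mod_cast h)
        exact absurd (lt_of_lt_of_le hyx this) (lt_irrefl y)
    rw [show ((y :: ys : List Char) : Multiset Char) = y ::ₘ (ys : Multiset Char) from rfl,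
        Multiset.inter_comm, Multiset.cons_inter_of_neg _ hnot, Multiset.inter_comm]
    simp [pvMergeCommon, hxy, hlt, ih ha hb.2]

-- sum of a function over a nodup list = Finset sum over its toFinset
theorem pv_sum_toFinset (V : List Char) (hV : V.Nodup) (f : Char → Int) :
    ∑ c ∈ V.toFinset, f c = (V.map f).sum :=
  List.sum_toFinset f hV

-- total count over any finset containing the support = length
theorem pv_sum_count (ls : List Char) (F : Finset Char) (h : ls.toFinset ⊆ F) :
    ∑ c ∈ F, (ls.count c : Int) = (ls.length : Int) := by
  rw [← Finset.sum_subset h (by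
    intro c _ hc
    simp only [List.mem_toFinset] at hc
    simp [List.count_eq_zero_of_not_mem hc]), ← Nat.cast_sum]
  have hsum : ∑ c ∈ ls.toFinset, ls.count c = ls.length := by simp
  rw [hsum]

-- the multiset-intersection size is the summed per-character minimum over any covering finset
theorem pv_inter_card (ls lt : List Char) (F : Finset Char) (h : ls.toFinset ⊆ F) :
    ((((ls : Multiset Char) ∩ (lt : Multiset Char)).card : Int))
      = ∑ c ∈ F, min (ls.count c : Int) (lt.count c : Int) := by
  have hsub : ((ls : Multiset Char) ∩ (lt : Multiset Char)).toFinset ⊆ F := by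
    intro c hc
    apply h
    rw [Multiset.mem_toFinset, Multiset.mem_inter] at hc
    simpa [List.mem_toFinset] using hc.1
  have hnat : ((ls : Multiset Char) ∩ (lt : Multiset Char)).card
      = ∑ c ∈ F, min (ls.count c) (lt.count c) := by
    calc ((ls : Multiset Char) ∩ (lt : Multiset Char)).card
        = ∑ c ∈ ((ls : Multiset Char) ∩ (lt : Multiset Char)).toFinset,
            Multiset.count c ((ls : Multiset Char) ∩ (lt : Multiset Char)) :=
          (Multiset.toFinset_sum_count_eq _).symm
      _ = ∑ c ∈ F, Multiset.count c ((ls : Multiset Char) ∩ (lt : Multiset Char)) :=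
          Finset.sum_subset hsub (fun c _ hc =>
            Multiset.count_eq_zero_of_notMem (by simpa [Multiset.mem_toFinset] using hc))
      _ = ∑ c ∈ F, min (ls.count c) (lt.count c) :=
          Finset.sum_congr rfl (fun c _ => by simp)
  rw [hnat]
  push_cast
  rfl

-- ===== VERDICT (by name: the statement is the Claim_ definition above) =====
theorem create_anagram_spec : Claim_equal_create_anagram := by
  intro s t _
  unfold Spec_create_anagram create_anagram create_anagram_alt
  simp only []
  set ls := s.toList with hls
  set lt := t.toList with hlt
  set U : List Char := PySem.Set.union (PySem.Set.ofList (PySem.Dict.counter ls).keys)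
      (PySem.Set.ofList (PySem.Dict.counter lt).keys) with hU
  have hkeys_s : (PySem.Dict.counter ls).keys = PySem.Set.ofList ls := PySem.Dict.keys_counter ls
  have hkeys_t : (PySem.Dict.counter lt).keys = PySem.Set.ofList lt := PySem.Dict.keys_counter lt
  have hUnodup : U.Nodup := PySem.Set.nodup_union _ _ (PySem.Set.nodup_ofList _)
  have hUmem : ∀ c, c ∈ U ↔ c ∈ ls ∨ c ∈ lt := by
    intro c
    simp [hU, PySem.Set.mem_union, PySem.Set.mem_ofList, hkeys_s, hkeys_t]
  -- A's fold to a Finset sum of |count difference|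
  rw [PySem.List.foldl_add]
  have hmapA : U.map (fun c => |(PySem.Dict.counter ls).getD c 0 - (PySem.Dict.counter lt).getD c 0|)
      = U.map (fun c => |(ls.count c : Int) - (lt.count c : Int)|) := by
    apply List.map_congr_left; intro c _
    rw [PySem.Dict.getD_counter, PySem.Dict.getD_counter]
  rw [hmapA, ← pv_sum_toFinset U hUnodup]
  have hUF : U.toFinset = ls.toFinset ∪ lt.toFinset := by
    ext c
    simp only [List.mem_toFinset, Finset.mem_union]
    exact hUmem c
  rw [hUF]
  set F := ls.toFinset ∪ lt.toFinset with hF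
  have hsub_s : ls.toFinset ⊆ F := Finset.subset_union_left
  have hsub_t : lt.toFinset ⊆ F := Finset.subset_union_right
  have habs : ∑ c ∈ F, |(ls.count c : Int) - (lt.count c : Int)|
      = (∑ c ∈ F, (ls.count c : Int)) + (∑ c ∈ F, (lt.count c : Int))
        - 2 * ∑ c ∈ F, min (ls.count c : Int) (lt.count c : Int) := by
    rw [← Finset.sum_add_distrib, Finset.mul_sum, ← Finset.sum_sub_distrib]
    apply Finset.sum_congr rfl
    intro c _
    rcases le_total ((ls.count c : Int)) ((lt.count c : Int)) with h | h
    · rw [min_eq_left h, abs_of_nonpos (by omega)]; ring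
    · rw [min_eq_right h, abs_of_nonneg (by omega)]; ring
  rw [habs, pv_sum_count ls F hsub_s,
      pv_sum_count lt F (by rw [hF, Finset.union_comm]; exact Finset.subset_union_left)]
  -- B's merge count to the same Finset sum of minima
  have hperm_s : (PySem.List.sorted ls (fun c => c)).Perm ls := PySem.List.sorted_perm ls _ _
  have hperm_t : (PySem.List.sorted lt (fun c => c)).Perm lt := PySem.List.sorted_perm lt _ _
  have hmerge : pvMergeCommon (PySem.List.sorted ls (fun c => c)) (PySem.List.sorted lt (fun c => c))
      = ∑ c ∈ F, min (ls.count c : Int) (lt.count c : Int) := by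
    rw [pv_mergeCommon_eq_inter _ _
        (by simpa using PySem.List.sorted_pairwise ls (fun c => c))
        (by simpa using PySem.List.sorted_pairwise lt (fun c => c)),
        Multiset.coe_eq_coe.mpr hperm_s, Multiset.coe_eq_coe.mpr hperm_t]
    exact pv_inter_card ls lt F hsub_s
  rw [hmerge]
  have hlen_s : (PySem.Str.len s : Int) = (ls.length : Int) := by simp [PySem.Str.len_eq, hls]
  have hlen_t : (PySem.Str.len t : Int) = (lt.length : Int) := by simp [PySem.Str.len_eq, hlt]
  rw [hlen_s, hlen_t]
  set m := ∑ c ∈ F, min (ls.count c : Int) (lt.count c : Int) with hm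
  rw [PySem.Int.floordiv_eq_ediv_of_pos (by norm_num),
      PySem.Int.floordiv_eq_ediv_of_pos (by norm_num)]
  omega
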